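-- pv_equiv track=rewrite | github.com/raeez/chiral-bar-cobar | compute/lib/bar_higher_arity_engine.py | cyclic_action_on_basis
-- ===== SOURCE A (Python) =====
-- from typing import Dict, FrozenSet, Iterable, List, Optional, Sequence, Tuple
--
-- def cyclic_action_on_basis(basis: List[Tuple[int, ...]]
--                             ) -> Dict[Tuple[int, ...], Tuple[int, Tuple[int, ...]]]:
--     """Apply the cyclic rotation t: (a_1, ..., a_n) -> (a_2, ..., a_n, a_1).
--
--     The output keeps the SORTED tuple as the canonical representative
--     (since our basis is the sorted-tuple basis), with a sign determined
--     by the permutation needed to sort the rotated tuple.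
--     """
--     out = {}
--     for tup in basis:
--         n = len(tup)
--         if n == 0:
--             out[tup] = (1, tup)
--             continue
--         rotated = tup[1:] + (tup[0],)
--         # Compute the sign of the permutation that sorts `rotated`
--         # back to a sorted tuple
--         sign, sorted_rot = _sort_with_sign(list(rotated))
--         out[tup] = (sign, tuple(sorted_rot))
--     return out
--
-- def _sort_with_sign(lst: List[int]) -> Tuple[int, List[int]]:
--     """Return (sign, sorted_list) where sign is the parity of the permutation."""
--     n = len(lst)
--     a = list(lst)
--     sign = 1
--     for i in range(n):
--         for j in range(0, n - i - 1):
--             if a[j] > a[j + 1]: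
--                 a[j], a[j + 1] = a[j + 1], a[j]
--                 sign = -sign
--     return sign, a
-- ===== SOURCE B (Python) =====
-- from typing import Dict, List, Tuple
--
-- def cyclic_action_on_basis(basis: List[Tuple[int, ...]]
--                             ) -> Dict[Tuple[int, ...], Tuple[int, Tuple[int, ...]]]:
--     """Rotate each tuple; canonical representative = sorted tuple, sign =
--     parity of the inversions of the rotated tuple (no swap simulation)."""
--     out = {}
--     for tup in basis:
--         if len(tup) == 0:
--             out[tup] = (1, tup)
--         else:
--             rotated = tup[1:] + (tup[0],)
--             inv = _inversions(list(rotated))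
--             sign = 1 if inv % 2 == 0 else -1
--             out[tup] = (sign, tuple(sorted(rotated)))
--     return out
--
-- def _inversions(lst: List[int]) -> int:
--     """Number of pairs i < j with lst[i] > lst[j], by peeling the head."""
--     inv = 0
--     rest = lst
--     while rest:
--         x, rest = rest[0], rest[1:]
--         inv += sum(1 for y in rest if x > y)
--     return inv
-- ===== Notes on version B (the rewrite author's own statement) =====
-- stated objective: alternative
-- what changed: A simulates a bubble sort, flipping the sign at every adjacent swap; B computes the sign directly as the parity of the inversion count of the rotated tuple and gets the representative from the library sort, with no swap simulation.
import Mathlib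
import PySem

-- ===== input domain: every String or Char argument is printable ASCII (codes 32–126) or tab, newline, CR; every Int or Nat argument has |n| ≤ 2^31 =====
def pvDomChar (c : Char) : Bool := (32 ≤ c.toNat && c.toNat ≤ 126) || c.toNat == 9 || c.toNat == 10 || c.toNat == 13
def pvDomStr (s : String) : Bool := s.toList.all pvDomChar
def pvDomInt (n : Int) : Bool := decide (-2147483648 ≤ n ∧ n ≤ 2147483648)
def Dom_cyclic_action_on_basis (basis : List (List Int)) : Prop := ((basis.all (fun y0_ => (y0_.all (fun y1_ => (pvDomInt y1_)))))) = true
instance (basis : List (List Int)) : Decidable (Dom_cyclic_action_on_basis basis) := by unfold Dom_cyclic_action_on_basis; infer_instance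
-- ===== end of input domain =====

-- B replaces A's bubble-sort-with-sign by a direct inversion-parity count plus the library sort; return values proved equal.

-- ===== PORT A =====
-- body of the inner `for j` loop of _sort_with_sign: compare a[j], a[j+1], swap and flip sign
def swapStep (st : List Int × Int) (j : Int) : List Int × Int :=
  let a := st.1
  if PySem.List.pyGetD a j 0 > PySem.List.pyGetD a (j + 1) 0 then
    (PySem.List.pySetD (PySem.List.pySetD a j (PySem.List.pyGetD a (j + 1) 0)) (j + 1)
       (PySem.List.pyGetD a j 0), -st.2)
  else st

-- port of _sort_with_sign: the two index loops become folds over pyRange on the state (a, sign)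
def sortWithSign (lst : List Int) : Int × List Int :=
  let n : Int := lst.length
  let st := (PySem.List.pyRange 0 n 1).foldl
    (fun st i => (PySem.List.pyRange 0 (n - i - 1) 1).foldl swapStep st) (lst, 1)
  (st.2, st.1)

def cyclic_action_on_basis (basis : List (List Int)) : List (List Int × Int × List Int) :=
  (basis.foldl (fun (out : PySem.Dict (List Int) (Int × List Int)) tup =>
      let n : Int := tup.length
      if n == 0 then out.insert tup (1, tup)
      else
        let rotated := PySem.List.slice tup (some 1) none ++ [PySem.List.pyGetD tup 0 0]
        let r := sortWithSign rotated
        out.insert tup (r.1, r.2)) PySem.Dict.empty).items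

-- ===== PORT B =====
-- port of _inversions: the while loop peeling the head; the 0/1 generator sum is List.countP
def invAux : List Int → Int → Int
  | [], inv => inv
  | x :: rest, inv => invAux rest (inv + (rest.countP (fun y => decide (x > y)) : Int))

def cyclic_action_on_basis_alt (basis : List (List Int)) : List (List Int × Int × List Int) :=
  (basis.foldl (fun (out : PySem.Dict (List Int) (Int × List Int)) tup =>
      if (tup.length : Int) == 0 then out.insert tup (1, tup)
      else
        let rotated := PySem.List.slice tup (some 1) none ++ [PySem.List.pyGetD tup 0 0]
        let inv := invAux rotated 0
        let sign : Int := if PySem.Int.mod inv 2 == 0 then 1 else -1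
        out.insert tup (sign, PySem.List.sorted rotated (fun x => x) false)) PySem.Dict.empty).items

-- ===== PRECONDITION & SPEC =====
def Spec_cyclic_action_on_basis (basis : List (List Int)) (out : List (List Int × Int × List Int)) : Prop := out = cyclic_action_on_basis_alt basis
instance (basis : List (List Int)) (out : List (List Int × Int × List Int)) : Decidable (Spec_cyclic_action_on_basis basis out) := by unfold Spec_cyclic_action_on_basis; infer_instance

-- ===== CLAIM (what is proved, stated in full; the proofs are below) =====
def Claim_equal_cyclic_action_on_basis : Prop := ∀ (basis : List (List Int)), Dom_cyclic_action_on_basis basis → Spec_cyclic_action_on_basis basis (cyclic_action_on_basis basis)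

-- ===== LEMMAS AND PROOFS =====

-- number of inversions (pairs i < j with l[i] > l[j])
def invCount : List Int → Nat
  | [] => 0
  | x :: rest => rest.countP (fun y => decide (x > y)) + invCount rest

theorem invAux_eq (l : List Int) : ∀ c : Int, invAux l c = c + (invCount l : Nat) := by
  induction l with
  | nil => intro c; simp [invAux, invCount]
  | cons x rest ih => intro c; simp [invAux, invCount, ih]; ring

-- one (possibly partial) bubble pass: m comparisons from the head
def passN : Nat → List Int → List Int × Int
  | 0, a => (a, 1)
  | _ + 1, [] => ([], 1)
  | _ + 1, [x] => ([x], 1)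
  | m + 1, x :: y :: t =>
    if y < x then
      let p := passN m (x :: t); (y :: p.1, -p.2)
    else
      let p := passN m (y :: t); (x :: p.1, p.2)

theorem passN_perm : ∀ (m : Nat) (a : List Int), ((passN m a).1).Perm a := by
  intro m
  induction m with
  | zero => intro a; simp [passN]
  | succ m ih =>
    intro a
    match a with
    | [] => simp [passN]
    | [x] => simp [passN]
    | x :: y :: t =>
      simp only [passN]
      split
      · exact ((ih (x :: t)).cons y).trans (List.Perm.swap x y t)
      · exact (ih (y :: t)).cons x

theorem invCount_cons (x : Int) (rest : List Int) :
    invCount (x :: rest) = rest.countP (fun y => decide (x > y)) + invCount rest := rfl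

theorem countP_perm_gt (x : Int) {l l' : List Int} (h : l.Perm l') :
    l.countP (fun y => decide (x > y)) = l'.countP (fun y => decide (x > y)) :=
  h.countP_eq _

theorem passN_sign : ∀ (m : Nat) (a : List Int),
    ∃ k : Nat, (passN m a).2 = (-1 : Int) ^ k ∧ invCount a = invCount (passN m a).1 + k := by
  intro m
  induction m with
  | zero => intro a; exact ⟨0, by simp [passN], by simp [passN]⟩
  | succ m ih =>
    intro a
    match a with
    | [] => exact ⟨0, by simp [passN], by simp [passN]⟩
    | [x] => exact ⟨0, by simp [passN], by simp [passN]⟩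
    | x :: y :: t =>
      simp only [passN]
      split
      · rename_i hyx
        obtain ⟨k, hs, hc⟩ := ih (x :: t)
        refine ⟨k + 1, by simp [hs, pow_succ], ?_⟩
        show invCount (x :: y :: t) = invCount (y :: (passN m (x :: t)).1) + (k + 1)
        have hperm := passN_perm m (x :: t)
        have h1 : invCount (y :: (passN m (x :: t)).1)
            = (x :: t).countP (fun w => decide (y > w)) + invCount (passN m (x :: t)).1 := by
          rw [invCount_cons, countP_perm_gt y hperm]
        have h2 : invCount (x :: t) = t.countP (fun w => decide (x > w)) + invCount t := rfl
        have h3 : invCount (x :: y :: t)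
            = (y :: t).countP (fun w => decide (x > w)) + ((t.countP (fun w => decide (y > w))) + invCount t) := rfl
        have h4 : (y :: t).countP (fun w => decide (x > w)) = 1 + t.countP (fun w => decide (x > w)) := by
          simp [hyx]; omega
        have h5 : (x :: t).countP (fun w => decide (y > w)) = t.countP (fun w => decide (y > w)) := by
          simp [not_lt.mpr (le_of_lt hyx)]
        omega
      · rename_i hyx
        obtain ⟨k, hs, hc⟩ := ih (y :: t)
        refine ⟨k, by simp [hs], ?_⟩
        show invCount (x :: y :: t) = invCount (x :: (passN m (y :: t)).1) + k
        have hperm := passN_perm m (y :: t)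
        have h1 : invCount (x :: (passN m (y :: t)).1)
            = (y :: t).countP (fun w => decide (x > w)) + invCount (passN m (y :: t)).1 := by
          rw [invCount_cons, countP_perm_gt x hperm]
        have h2 : invCount (y :: t) = t.countP (fun w => decide (y > w)) + invCount t := rfl
        have h3 : invCount (x :: y :: t)
            = (y :: t).countP (fun w => decide (x > w)) + ((t.countP (fun w => decide (y > w))) + invCount t) := rfl
        omega

theorem passN_struct : ∀ (m : Nat) (a : List Int), m < a.length →
    ∃ u z, (passN m a).1 = u ++ z :: a.drop (m + 1) ∧ u.length = m ∧
      (∀ w ∈ u, w ≤ z) ∧ (∀ w ∈ a.take (m + 1), w ≤ z) ∧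
      (∀ w ∈ u ++ [z], w ∈ a.take (m + 1)) := by
  intro m
  induction m with
  | zero =>
    intro a ha
    match a with
    | x :: t =>
      refine ⟨[], x, by simp [passN], rfl, by simp, ?_, by simp⟩
      intro w hw; simp at hw; simp [hw]
  | succ m ih =>
    intro a ha
    match a with
    | [x] => simp at ha
    | x :: y :: t =>
      have hlt : m < (x :: t).length := by simp at ha ⊢; omega
      simp only [passN]
      split
      · rename_i hyx
        obtain ⟨u, z, h1, h2, h3, h4, h5⟩ := ih (x :: t) hlt
        refine ⟨y :: u, z, ?_, by simp [h2], ?_, ?_, ?_⟩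
        · show y :: (passN m (x :: t)).1 = (y :: u) ++ z :: (x :: y :: t).drop (m + 1 + 1)
          simp [h1]
        · intro w hw
          rcases List.mem_cons.mp hw with h | h
          · rw [h]
            exact le_of_lt (lt_of_lt_of_le hyx (h4 x (by simp)))
          · exact h3 w h
        · intro w hw
          rw [show (x :: y :: t).take (m + 1 + 1) = x :: y :: t.take m by simp] at hw
          rcases List.mem_cons.mp hw with h | h
          · rw [h]; exact h4 x (by simp)
          rcases List.mem_cons.mp h with h' | h'
          · rw [h']
            exact le_of_lt (lt_of_lt_of_le hyx (h4 x (by simp)))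
          · exact h4 w (by simp; right; exact h')
        · intro w hw
          rw [show (x :: y :: t).take (m + 1 + 1) = x :: y :: t.take m by simp]
          rcases List.mem_append.mp hw with h | h
          · rcases List.mem_cons.mp h with h' | h'
            · simp [h']
            · have := h5 w (by simp [h'])
              simp at this
              rcases this with h'' | h'' <;> simp [h'']
          · have := h5 w (by simp at h; simp [h])
            simp at this
            rcases this with h'' | h'' <;> simp [h'']
      · rename_i hyx
        have hxy : x ≤ y := not_lt.mp hyx
        have hlt' : m < (y :: t).length := by simp at ha ⊢; omega
        obtain ⟨u, z, h1, h2, h3, h4, h5⟩ := ih (y :: t) hlt'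
        have hxz : x ≤ z := le_trans hxy (h4 y (by simp))
        refine ⟨x :: u, z, ?_, by simp [h2], ?_, ?_, ?_⟩
        · show x :: (passN m (y :: t)).1 = (x :: u) ++ z :: (x :: y :: t).drop (m + 1 + 1)
          simp [h1]
        · intro w hw
          rcases List.mem_cons.mp hw with h | h
          · rw [h]; exact hxz
          · exact h3 w h
        · intro w hw
          rw [show (x :: y :: t).take (m + 1 + 1) = x :: y :: t.take m by simp] at hw
          rcases List.mem_cons.mp hw with h | h
          · rw [h]; exact hxz
          rcases List.mem_cons.mp h with h' | h'
          · rw [h']; exact h4 y (by simp)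
          · exact h4 w (by simp; right; exact h')
        · intro w hw
          rw [show (x :: y :: t).take (m + 1 + 1) = x :: y :: t.take m by simp]
          rcases List.mem_append.mp hw with h | h
          · rcases List.mem_cons.mp h with h' | h'
            · simp [h']
            · have := h5 w (by simp [h'])
              simp at this
              rcases this with h'' | h'' <;> simp [h'']
          · have := h5 w (by simp at h; simp [h])
            simp at this
            rcases this with h'' | h'' <;> simp [h'']

theorem pyRange_natCast_map (n : Nat) :
    PySem.List.pyRange 0 (n : Int) 1 = (List.range n).map (Nat.cast : Nat → Int) := by
  rw [PySem.List.pyRange_one]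
  rw [show ((n : Int) - 0).toNat = n by omega]
  exact List.map_congr_left (fun k _ => by ring)

-- single-index shift: a swap at index k+1 on z::b is the swap at index k on b
theorem swapStep_cons (z : Int) (b : List Int) (s : Int) (k : Nat) :
    swapStep (z :: b, s) ((k : Int) + 1) = (z :: (swapStep (b, s) (k : Int)).1, (swapStep (b, s) (k : Int)).2) := by
  have e1 : ((k : Int) + 1) = ((k + 1 : Nat) : Int) := by push_cast; ring
  have e2 : ((k : Int) + 1 + 1) = ((k + 2 : Nat) : Int) := by push_cast; ring
  simp only [swapStep]
  rw [e2, e1]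
  simp only [PySem.List.pyGetD_natCast, PySem.List.pySetD_natCast]
  have g1 : (z :: b).getD (k + 1) 0 = b.getD k 0 := rfl
  have g2 : (z :: b).getD (k + 2) 0 = b.getD (k + 1) 0 := rfl
  have s1 : ∀ v, (z :: b).set (k + 1) v = z :: b.set k v := fun v => rfl
  have s2 : ∀ v w, (z :: b.set k v).set (k + 2) w = z :: (b.set k v).set (k + 1) w := fun v w => rfl
  rw [g1, g2]
  split
  · rw [s1, s2]
  · rfl

theorem shiftFold (l : List Nat) : ∀ (z : Int) (b : List Int) (s : Int),
    l.foldl (fun st (k : Nat) => swapStep st ((k : Int) + 1)) (z :: b, s)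
      = (z :: (l.foldl (fun st (k : Nat) => swapStep st (k : Int)) (b, s)).1,
         (l.foldl (fun st (k : Nat) => swapStep st (k : Int)) (b, s)).2) := by
  induction l with
  | nil => intro z b s; simp
  | cons k l ih =>
    intro z b s
    simp only [List.foldl_cons]
    rw [swapStep_cons]
    have := ih z (swapStep (b, s) (k : Int)).1 (swapStep (b, s) (k : Int)).2
    simpa using this

-- the inner index loop is passN
theorem innerFold_eq : ∀ (m : Nat) (a : List Int) (s : Int), m < a.length →
    (PySem.List.pyRange 0 (m : Int) 1).foldl swapStep (a, s) = ((passN m a).1, s * (passN m a).2) := by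
  intro m
  induction m with
  | zero => intro a s _; simp [passN]
  | succ m ih =>
    intro a s h
    match a with
    | [] => simp at h
    | [x] => simp at h
    | x :: y :: t =>
      rw [pyRange_natCast_map, List.range_succ_eq_map, List.map_cons, List.foldl_cons, List.map_map]
      have hstep : swapStep (x :: y :: t, s) ((0 : Nat) : Int)
          = (if y < x then (y :: x :: t, -s) else (x :: y :: t, s)) := by
        simp only [swapStep, Nat.cast_zero, zero_add]
        have g1 : PySem.List.pyGetD (x :: y :: t) 0 0 = x := by
          simp [PySem.List.pyGetD_zero_cons]
        have g2 : PySem.List.pyGetD (x :: y :: t) 1 0 = y := by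
          rw [show (1 : Int) = ((1 : Nat) : Int) by norm_num, PySem.List.pyGetD_natCast]; rfl
        rw [g1, g2]
        split
        · rw [show (1 : Int) = ((1 : Nat) : Int) by norm_num, PySem.List.pySetD_natCast,
            show (0 : Int) = ((0 : Nat) : Int) by norm_num, PySem.List.pySetD_natCast]
          rfl
        · rfl
      rw [hstep]
      have hcomp : ((Nat.cast : Nat → Int) ∘ Nat.succ) = fun (k : Nat) => (k : Int) + 1 := by
        funext k; simp [Nat.succ_eq_add_one]
      rw [hcomp, List.foldl_map]
      have hlen : m < (x :: t).length := by simp at h ⊢; omega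
      have hlen' : m < (y :: t).length := by simp at h ⊢; omega
      split
      · rename_i hyx
        rw [shiftFold]
        have hx := ih (x :: t) (-s) hlen
        rw [pyRange_natCast_map, List.foldl_map] at hx
        rw [hx]
        simp only [passN, if_pos hyx]
        exact Prod.ext rfl (by ring)
      · rename_i hyx
        rw [shiftFold]
        have hx := ih (y :: t) s hlen'
        rw [pyRange_natCast_map, List.foldl_map] at hx
        rw [hx]
        simp [passN, hyx]

-- whole-pass cascade with shrinking bounds
def bub : Nat → List Int → List Int × Int
  | 0, a => (a, 1)
  | k + 1, a =>
    let p := passN k a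
    let q := bub k p.1
    (q.1, p.2 * q.2)

theorem bub_perm : ∀ (k : Nat) (a : List Int), ((bub k a).1).Perm a := by
  intro k
  induction k with
  | zero => intro a; simp [bub]
  | succ k ih =>
    intro a
    simp only [bub]
    exact (ih (passN k a).1).trans (passN_perm k a)

theorem bub_sign : ∀ (k : Nat) (a : List Int),
    ∃ kk : Nat, (bub k a).2 = (-1 : Int) ^ kk ∧ invCount a = invCount (bub k a).1 + kk := by
  intro k
  induction k with
  | zero => intro a; exact ⟨0, by simp [bub], by simp [bub]⟩
  | succ k ih =>
    intro a
    obtain ⟨k1, hs1, hc1⟩ := passN_sign k a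
    obtain ⟨k2, hs2, hc2⟩ := ih (passN k a).1
    refine ⟨k1 + k2, ?_, ?_⟩
    · show (passN k a).2 * (bub k (passN k a).1).2 = (-1 : Int) ^ (k1 + k2)
      rw [hs1, hs2, pow_add]
    · show invCount a = invCount (bub k (passN k a).1).1 + (k1 + k2)
      omega

theorem bub_sorted : ∀ (k : Nat) (a : List Int), k ≤ a.length →
    (a.drop k).Pairwise (· ≤ ·) → (∀ x ∈ a.take k, ∀ y ∈ a.drop k, x ≤ y) →
    ((bub k a).1).Pairwise (· ≤ ·) := by
  intro k
  induction k with
  | zero => intro a _ h1 _; simpa using h1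
  | succ k ih =>
    intro a hk h1 h2
    have hklen : k < a.length := by omega
    obtain ⟨u, z, he, hu, huz, hmax, hmem⟩ := passN_struct k a hklen
    show ((bub k (passN k a).1).1).Pairwise (· ≤ ·)
    have hlen : (passN k a).1.length = a.length := (passN_perm k a).length_eq
    apply ih (passN k a).1 (by omega)
    · rw [he, List.drop_left' hu]
      refine List.pairwise_cons.mpr ⟨?_, h1⟩
      intro y hy
      exact h2 z (hmem z (by simp)) y hy
    · intro x hx y hy
      rw [he, List.take_left' hu] at hx
      rw [he, List.drop_left' hu] at hy
      rcases List.mem_cons.mp hy with h | h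
      · rw [h]; exact huz x hx
      · exact h2 x (hmem x (by simp [hx])) y h

theorem outerFold_eq : ∀ (k : Nat) (a : List Int) (s : Int), k ≤ a.length →
    (PySem.List.pyRange 0 (k : Int) 1).foldl
        (fun st i => (PySem.List.pyRange 0 ((k : Int) - i - 1) 1).foldl swapStep st) (a, s)
      = ((bub k a).1, s * (bub k a).2) := by
  intro k
  induction k with
  | zero => intro a s _; simp [bub]
  | succ k ih =>
    intro a s hk
    rw [pyRange_natCast_map, List.range_succ_eq_map, List.map_cons, List.foldl_cons,
        List.map_map, List.foldl_map]
    rw [show (((k + 1 : Nat) : Int) - ((0 : Nat) : Int) - 1) = ((k : Nat) : Int) by push_cast; ring]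
    rw [innerFold_eq k a s (by omega)]
    have hfun : (fun (st : List Int × Int) (j : Nat) =>
          (PySem.List.pyRange 0 (((k + 1 : Nat) : Int) - ((Nat.cast ∘ Nat.succ) j) - 1) 1).foldl swapStep st)
        = (fun (st : List Int × Int) (j : Nat) =>
          (PySem.List.pyRange 0 (((k : Nat) : Int) - ((j : Nat) : Int) - 1) 1).foldl swapStep st) := by
      funext st j
      rw [show (((k + 1 : Nat) : Int) - ((Nat.cast ∘ Nat.succ) j) - 1) = (((k : Nat) : Int) - ((j : Nat) : Int) - 1) by
        simp only [Function.comp_apply]; push_cast; ring]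
    rw [hfun]
    have hlen : k ≤ (passN k a).1.length := by
      rw [(passN_perm k a).length_eq]; omega
    have hih := ih (passN k a).1 (s * (passN k a).2) hlen
    rw [pyRange_natCast_map, List.foldl_map] at hih
    rw [hih]
    show ((bub k (passN k a).1).1, s * (passN k a).2 * (bub k (passN k a).1).2)
      = ((bub (k + 1) a).1, s * (bub (k + 1) a).2)
    simp only [bub]
    exact Prod.ext rfl (by ring)

theorem invCount_eq_zero_of_pairwise (l : List Int) (h : l.Pairwise (· ≤ ·)) : invCount l = 0 := by
  induction l with
  | nil => rfl
  | cons x rest ih =>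
    rw [List.pairwise_cons] at h
    rw [invCount_cons, ih h.2, List.countP_eq_zero.mpr]
    intro y hy
    simpa using not_lt.mpr (h.1 y hy)

theorem sortWithSign_eq (lst : List Int) :
    sortWithSign lst = ((if invCount lst % 2 = 0 then (1 : Int) else -1),
      PySem.List.sorted lst (fun x => x) false) := by
  show ((((PySem.List.pyRange 0 (lst.length : Int) 1).foldl
      (fun st i => (PySem.List.pyRange 0 ((lst.length : Int) - i - 1) 1).foldl swapStep st) (lst, 1))).2,
      (((PySem.List.pyRange 0 (lst.length : Int) 1).foldl
      (fun st i => (PySem.List.pyRange 0 ((lst.length : Int) - i - 1) 1).foldl swapStep st) (lst, 1))).1) = _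
  rw [outerFold_eq lst.length lst 1 le_rfl]
  obtain ⟨kk, hs, hc⟩ := bub_sign lst.length lst
  have hsorted := bub_sorted lst.length lst le_rfl (by simp) (by simp)
  have hperm := bub_perm lst.length lst
  have h0 : invCount (bub lst.length lst).1 = 0 := invCount_eq_zero_of_pairwise _ hsorted
  have hrep : PySem.List.sorted lst (fun x => x) false = (bub lst.length lst).1 :=
    PySem.List.sorted_id_eq_of_perm_of_pairwise lst (bub lst.length lst).1 hperm hsorted
  have hkk : invCount lst = kk := by omega
  refine Prod.ext ?_ (by simp [hrep])
  show 1 * (bub lst.length lst).2 = _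
  rw [one_mul, hs, ← hkk]
  rcases Nat.even_or_odd (invCount lst) with he | ho
  · rw [he.neg_one_pow, if_pos (Nat.even_iff.mp he)]
  · rw [ho.neg_one_pow, if_neg (by rw [Nat.odd_iff.mp ho]; omega)]

-- ===== VERDICT (by name: the statement is the Claim_ definition above) =====
theorem value_sign_eq (rotated : List Int) :
    (if PySem.Int.mod (invAux rotated 0) 2 == 0 then (1 : Int) else -1)
      = (if invCount rotated % 2 = 0 then (1 : Int) else -1) := by
  rw [invAux_eq, zero_add]
  rw [PySem.Int.mod_eq_emod_of_pos (by norm_num)]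
  by_cases h : invCount rotated % 2 = 0
  · rw [if_pos h, if_pos (by simp; omega)]
  · rw [if_neg h, if_neg (by simp; omega)]

theorem cyclic_action_on_basis_spec : Claim_equal_cyclic_action_on_basis := by
  intro basis _
  show cyclic_action_on_basis basis = cyclic_action_on_basis_alt basis
  unfold cyclic_action_on_basis cyclic_action_on_basis_alt
  congr 1
  apply PySem.List.foldl_congr_mem
  intro out tup _
  show (if ((tup.length : Int) == 0) = true then _ else _) = _
  by_cases h0 : tup.length = 0
  · simp [h0]
  · have hne : ((tup.length : Int) == 0) = false := by
      simp only [beq_eq_false_iff_ne, ne_eq, Int.natCast_eq_zero]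
      exact h0
    simp only [hne, Bool.false_eq_true, if_false]
    rw [sortWithSign_eq, value_sign_eq]
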